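-- pv_equiv track=rewrite | github.com/manaspalaparthi/HomeGuardian2.1 | wifi_scanner.py | parse_wifi_info
-- ===== SOURCE A (Python) =====
-- def parse_wifi_info(qr_data):
--     # Example QR data format: WIFI:S:<SSID>;T:<WPA|WEP|>;P:<PASSWORD>;;
--     wifi_info = {}
--     data = qr_data[5:]  # Remove 'WIFI:'
--     elements = data.split(';')
--     for element in elements:
--         if element.startswith('S:'):
--             wifi_info['ssid'] = element[2:]
--         elif element.startswith('T:'):
--             wifi_info['type'] = element[2:]
--         elif element.startswith('P:'):
--             wifi_info['password'] = element[2:]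
--     return wifi_info
-- ===== SOURCE B (Python) =====
-- def parse_wifi_info(qr_data):
--     # Pass 1: tokenize every 'key:value' element into a raw map (last value wins,
--     # first occurrence fixes position, exactly like dict assignment).
--     raw = {}
--     for element in qr_data[5:].split(';'):
--         if ':' in element:
--             key, value = element.split(':', 1)
--             raw[key] = value
--     # Pass 2: project the raw map through a fixed renaming.
--     names = {'S': 'ssid', 'T': 'type', 'P': 'password'}
--     return {names[k]: v for k, v in raw.items() if k in names}
-- ===== Notes on version B (the rewrite author's own statement) =====
-- stated objective: idiomatic
-- what changed: Instead of a single loop with an if/elif prefix chain, B runs two passes: it first tokenizes every colon-separated element into a raw key-to-value map with a maxsplit-1 split, then projects that map through the fixed renaming of the three recognized keys (S, T, P) to their field names.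
import Mathlib
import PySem

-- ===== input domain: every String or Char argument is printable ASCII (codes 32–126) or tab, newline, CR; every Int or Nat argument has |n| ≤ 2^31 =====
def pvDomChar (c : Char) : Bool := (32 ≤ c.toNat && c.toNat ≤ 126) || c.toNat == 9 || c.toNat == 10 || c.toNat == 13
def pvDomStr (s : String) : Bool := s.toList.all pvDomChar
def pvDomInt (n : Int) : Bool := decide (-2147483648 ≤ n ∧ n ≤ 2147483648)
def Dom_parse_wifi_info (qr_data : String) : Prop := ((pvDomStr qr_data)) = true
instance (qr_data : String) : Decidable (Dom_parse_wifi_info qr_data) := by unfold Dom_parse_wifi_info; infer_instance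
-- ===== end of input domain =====

-- B re-implements the parser as two passes (tokenize all 'key:value' elements into a raw map, then
-- project it through a fixed renaming); objective: more idiomatic decomposition, same cost.

-- ===== PORT A =====
-- loop body of A's for-loop (the if/elif chain), kept as a named helper
def pvStepA (wifi_info : PySem.Dict String String) (element : String) : PySem.Dict String String :=
  if PySem.Str.startswith element "S:" then wifi_info.insert "ssid" (PySem.Str.slice element (some 2) none)
  else if PySem.Str.startswith element "T:" then wifi_info.insert "type" (PySem.Str.slice element (some 2) none)
  else if PySem.Str.startswith element "P:" then wifi_info.insert "password" (PySem.Str.slice element (some 2) none)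
  else wifi_info

def parse_wifi_info (qr_data : String) : List (String × String) :=
  let data := PySem.Str.slice qr_data (some 5) none          -- qr_data[5:]
  let elements := (PySem.Str.split? data ";").getD []        -- data.split(';'); sep ≠ "" so never none
  (elements.foldl pvStepA PySem.Dict.empty).items

-- ===== PORT B =====
-- the fixed renaming {'S':'ssid','T':'type','P':'password'}
def pvNames : PySem.Dict String String :=
  PySem.Dict.ofList [("S", "ssid"), ("T", "type"), ("P", "password")]

-- pass-1 loop body: tokenize one element into the raw map
def pvStepB (raw : PySem.Dict String String) (element : String) : PySem.Dict String String :=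
  if PySem.Str.isIn ":" element then
    match (PySem.Str.splitMax? element ":" 1).getD [] with   -- element.split(':', 1); sep ≠ "" so never none
    | [k, v] => raw.insert k v
    | _ => raw                                               -- unreachable: ':' in element gives exactly 2 pieces
  else raw

-- pass-2 body of the dict comprehension: project one raw item through the renaming
def pvProjStep (d : PySem.Dict String String) (p : String × String) : PySem.Dict String String :=
  if pvNames.contains p.1 then d.insert (pvNames.getD p.1 "") p.2 else d

def parse_wifi_info_alt (qr_data : String) : List (String × String) :=
  let raw := ((PySem.Str.split? (PySem.Str.slice qr_data (some 5) none) ";").getD []).foldl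
      pvStepB PySem.Dict.empty
  (raw.items.foldl pvProjStep PySem.Dict.empty).items

-- ===== PRECONDITION & SPEC =====
def Spec_parse_wifi_info (qr_data : String) (out : List (String × String)) : Prop := out = parse_wifi_info_alt qr_data
instance (qr_data : String) (out : List (String × String)) : Decidable (Spec_parse_wifi_info qr_data out) := by unfold Spec_parse_wifi_info; infer_instance

-- ===== CLAIM (what is proved, stated in full; the proofs are below) =====
def Claim_equal_parse_wifi_info : Prop := ∀ (qr_data : String), Dom_parse_wifi_info qr_data → Spec_parse_wifi_info qr_data (parse_wifi_info qr_data)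

-- ===== LEMMAS AND PROOFS =====

-- the projection of a raw dict, as computed by B's second pass
def pvProj (r : PySem.Dict String String) : PySem.Dict String String :=
  r.items.foldl pvProjStep PySem.Dict.empty

theorem pvNames_eq : pvNames = PySem.Dict.mk [("S", "ssid"), ("T", "type"), ("P", "password")] := by
  decide

theorem contains_pvNames (s : String) :
    pvNames.contains s = (s == "S" || s == "T" || s == "P") := by
  rw [pvNames_eq]
  simp [PySem.Dict.contains_mk, BEq.comm, Bool.or_assoc]

-- inserting at a key the dict already has commutes (as items lists) with inserting at another key
theorem insert_insert_comm' (d : PySem.Dict String String) (m m1 : String) (v v1 : String)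
    (hm : d.contains m = true) (hne : m1 ≠ m) :
    (d.insert m v).insert m1 v1 = (d.insert m1 v1).insert m v := by
  by_cases h1 : d.contains m1 = true
  · apply PySem.Dict.ext
    rw [PySem.Dict.items_insert_of_contains _ _ (by simp [PySem.Dict.contains_insert, h1]),
        PySem.Dict.items_insert_of_contains _ _ hm,
        PySem.Dict.items_insert_of_contains _ _ (by simp [PySem.Dict.contains_insert, hm]),
        PySem.Dict.items_insert_of_contains _ _ h1]
    simp only [List.map_map]
    apply List.map_congr_left
    intro p _
    by_cases hp : p.1 = m
    · simp [Function.comp, hp, Ne.symm hne]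
    · by_cases hp1 : p.1 = m1 <;> simp [Function.comp, hp, hp1, hne]
  · apply PySem.Dict.ext
    rw [PySem.Dict.items_insert_of_not_contains _ _ (by simp [PySem.Dict.contains_insert, h1]; intro h; exact absurd h hne),
        PySem.Dict.items_insert_of_contains _ _ hm,
        PySem.Dict.items_insert_of_contains _ _ (by simp [PySem.Dict.contains_insert, hm]),
        PySem.Dict.items_insert_of_not_contains _ _ (by simpa using h1)]
    simp only [List.map_append]
    congr 1
    simp
    exact fun h => absurd h hne

-- a final overwrite at a key already present commutes with the projection fold,
-- provided no later item projects onto that key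
theorem fold_insert_comm (post : List (String × String)) (d : PySem.Dict String String)
    (m v : String) (hd : d.contains m = true)
    (hpost : ∀ p ∈ post, pvNames.contains p.1 = true → pvNames.getD p.1 "" ≠ m) :
    post.foldl pvProjStep (d.insert m v) = (post.foldl pvProjStep d).insert m v := by
  induction post generalizing d with
  | nil => rfl
  | cons p post ih =>
      simp only [List.foldl_cons]
      by_cases hp : pvNames.contains p.1 = true
      · have hne : pvNames.getD p.1 "" ≠ m := hpost p (by simp) hp
        show post.foldl pvProjStep (pvProjStep (d.insert m v) p) =
          (post.foldl pvProjStep (pvProjStep d p)).insert m v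
        unfold pvProjStep
        rw [if_pos hp, if_pos hp,
            insert_insert_comm' d m (pvNames.getD p.1 "") v p.2 hd hne]
        exact ih (d.insert (pvNames.getD p.1 "") p.2)
          (by simp [PySem.Dict.contains_insert, hd])
          (fun q hq hq2 => hpost q (by simp [hq]) hq2)
      · show post.foldl pvProjStep (pvProjStep (d.insert m v) p) =
          (post.foldl pvProjStep (pvProjStep d p)).insert m v
        unfold pvProjStep
        rw [if_neg hp, if_neg hp]
        exact ih d hd (fun q hq hq2 => hpost q (by simp [hq]) hq2)

theorem proj_insert_out (r : PySem.Dict String String) (k v : String)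
    (hk : pvNames.contains k = false) :
    pvProj (r.insert k v) = pvProj r := by
  unfold pvProj
  by_cases hc : r.contains k = true
  · rw [PySem.Dict.items_insert_of_contains _ _ hc]
    generalize (PySem.Dict.empty : PySem.Dict String String) = d
    induction r.items generalizing d with
    | nil => rfl
    | cons p l ih =>
        simp only [List.map_cons, List.foldl_cons]
        by_cases hp : p.1 = k
        · have h1 : pvProjStep d (k, v) = d := by unfold pvProjStep; rw [if_neg (by simp [hk])]
          have h2 : pvProjStep d p = d := by
            unfold pvProjStep; rw [if_neg (by rw [hp]; simp [hk])]
          rw [if_pos (by simp [hp]), h1, h2, ih d]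
        · rw [if_neg (by simp [hp]), ih (pvProjStep d p)]
  · rw [PySem.Dict.items_insert_of_not_contains _ _ (by simpa using hc), List.foldl_append]
    simp only [List.foldl_cons, List.foldl_nil]
    unfold pvProjStep
    rw [if_neg (by simp [hk])]

-- the renaming is injective on its domain
theorem pvNames_getD_inj (a b : String) (ha : pvNames.contains a = true)
    (hb : pvNames.contains b = true) (h : pvNames.getD a "" = pvNames.getD b "") : a = b := by
  rw [contains_pvNames] at ha hb
  simp only [Bool.or_eq_true, beq_iff_eq] at ha hb
  rcases ha with (ha | ha) | ha <;> rcases hb with (hb | hb) | hb <;> subst ha <;> subst hb <;>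
    first | rfl | exact absurd h (by decide)

theorem proj_insert_in (r : PySem.Dict String String) (k v : String)
    (hr : r.keys.Nodup) (hk : pvNames.contains k = true) :
    pvProj (r.insert k v) = (pvProj r).insert (pvNames.getD k "") v := by
  by_cases hc : r.contains k = true
  · -- key present: the new value replaces the old one inside the items list
    have hkeys : k ∈ r.items.map Prod.fst := (PySem.Dict.contains_iff_mem_keys r k).mp hc
    obtain ⟨p0, hp0mem, hp0⟩ := List.mem_map.mp hkeys
    obtain ⟨pre, post, hsplit⟩ := List.append_of_mem hp0mem
    obtain ⟨k0, v0⟩ := p0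
    simp only at hp0
    rw [hp0] at hsplit
    have hnd : (r.items.map Prod.fst).Nodup := hr
    rw [hsplit] at hnd
    simp only [List.map_append, List.map_cons, List.nodup_append, List.nodup_cons] at hnd
    have hkpre : ∀ p ∈ pre, p.1 ≠ k := fun p hp heq =>
      hnd.2.2 p.1 (List.mem_map_of_mem hp) k (by simp) heq
    have hkpost : k ∉ post.map Prod.fst := hnd.2.1.1
    have hitems : (r.insert k v).items = pre ++ (k, v) :: post := by
      rw [PySem.Dict.items_insert_of_contains _ _ hc, hsplit]
      simp only [List.map_append, List.map_cons]
      congr 1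
      · exact (List.map_congr_left (fun p hp => by
          rw [if_neg (by simp [hkpre p hp])]; rfl : ∀ p ∈ pre, _ = id p)).trans (List.map_id pre)
      · congr 1
        · simp
        · exact (List.map_congr_left (fun p hp => by
            rw [if_neg (by simp; intro h; exact hkpost (h ▸ List.mem_map_of_mem hp))]; rfl :
              ∀ p ∈ post, _ = id p)).trans (List.map_id post)
    unfold pvProj
    rw [hitems, hsplit, List.foldl_append, List.foldl_append]
    simp only [List.foldl_cons]
    set d0 := pre.foldl pvProjStep PySem.Dict.empty with hd0
    have hstep : pvProjStep d0 (k, v) = d0.insert (pvNames.getD k "") v := by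
      unfold pvProjStep; rw [if_pos hk]
    have hstep0 : pvProjStep d0 (k, v0) = d0.insert (pvNames.getD k "") v0 := by
      unfold pvProjStep; rw [if_pos hk]
    rw [hstep, hstep0, ← PySem.Dict.insert_insert_self d0 (pvNames.getD k "") v0 v]
    apply fold_insert_comm
    · simp
    · intro p hp hpc h
      exact hkpost (by
        have : p.1 = k := pvNames_getD_inj p.1 k hpc hk h
        exact this ▸ List.mem_map_of_mem hp)
  · unfold pvProj
    rw [PySem.Dict.items_insert_of_not_contains _ _ (by simpa using hc), List.foldl_append]
    simp only [List.foldl_cons, List.foldl_nil]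
    unfold pvProjStep
    rw [if_pos hk]

-- splitOnMax.go with budget 0 just flushes the remainder
theorem go0 (fuel : Nat) (l : List Char) (acc : List (List Char)) :
    PySem.Chars.splitOnMax.go [':'] fuel 0 l [] acc = (l :: acc).reverse := by
  cases fuel with
  | zero => simp [PySem.Chars.splitOnMax.go]
  | succ f => cases l <;> simp [PySem.Chars.splitOnMax.go]

theorem go1 (cs : List Char) (fuel : Nat) (cur : List Char) (acc : List (List Char))
    (hf : cs.length < fuel) (hc : ':' ∈ cs) :
    PySem.Chars.splitOnMax.go [':'] fuel 1 cs cur acc =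
      ((cs.dropWhile (· ≠ ':')).tail :: (cur.reverse ++ cs.takeWhile (· ≠ ':')) :: acc).reverse := by
  induction cs generalizing fuel cur acc with
  | nil => simp at hc
  | cons c rest ih =>
      cases fuel with
      | zero => omega
      | succ f =>
        by_cases hcc : c = ':'
        · subst hcc
          simp [PySem.Chars.splitOnMax.go, List.isPrefixOf, go0, List.dropWhile, List.takeWhile]
        · have hrest : ':' ∈ rest := by
            rcases List.mem_cons.mp hc with h | h
            · exact absurd h.symm hcc
            · exact h
          have hpre : [':'].isPrefixOf (c :: rest) = false := by
            simp [List.isPrefixOf]; exact fun h => absurd h.symm hcc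
          simp only [PySem.Chars.splitOnMax.go, hpre]
          rw [if_neg (by omega : ¬(1:Nat) = 0)]
          rw [ih f (c :: cur) acc (by simp at hf ⊢; omega) hrest]
          simp [List.dropWhile, List.takeWhile, hcc]

theorem splitOnMax_colon (cs : List Char) (hc : ':' ∈ cs) :
    PySem.Chars.splitOnMax cs [':'] 1 = [cs.takeWhile (· ≠ ':'), (cs.dropWhile (· ≠ ':')).tail] := by
  unfold PySem.Chars.splitOnMax
  rw [if_neg (by omega)]
  rw [show ((1:Int).toNat) = 1 from rfl]
  rw [go1 cs (cs.length+1) [] [] (by omega) hc]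
  simp

theorem dropWhile_colon (l : List Char) (hl : ':' ∈ l) :
    l.dropWhile (· ≠ ':') = ':' :: (l.dropWhile (· ≠ ':')).tail := by
  induction l with
  | nil => simp at hl
  | cons a t ih =>
      by_cases ha : a = ':'
      · subst ha; simp [List.dropWhile]
      · rw [List.dropWhile_cons_of_pos (by simp [ha])]
        exact ih (by
          rcases List.mem_cons.mp hl with h | h
          · exact absurd h.symm ha
          · exact h)

theorem isIn_colon (e : String) : PySem.Str.isIn ":" e = true ↔ ':' ∈ e.toList := by
  rw [PySem.Str.isIn_iff_infix]
  simpa using List.singleton_infix_iff ':' e.toList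

-- a prefix "c:" is the same as the first token being [c]
theorem key_startswith (e k1 v1 : List Char) (c : Char) (hc : c ≠ ':')
    (hcs : e = k1 ++ ':' :: v1) (hnc : ':' ∉ k1) :
    [c, ':'] <+: e ↔ k1 = [c] := by
  constructor
  · rintro ⟨t, ht⟩
    rw [hcs] at ht
    cases hk : k1 with
    | nil =>
        rw [hk] at ht; simp at ht
        exact absurd ht.1 hc
    | cons a rest =>
      cases rest with
      | nil => rw [hk] at ht; simp at ht; simp [ht.1]
      | cons b rest2 =>
          rw [hk] at ht; simp at ht
          exact absurd (by rw [hk]; exact List.mem_cons.mpr (Or.inr (by simp [← ht.2.1])) : ':' ∈ k1) hnc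
  · rintro hk
    exact ⟨v1, by rw [hcs, hk]; rfl⟩

-- the one-step commuting square: A's if/elif step equals B's tokenize step followed by projection
theorem step_comm (r : PySem.Dict String String) (hr : r.keys.Nodup) (e : String) :
    pvStepA (pvProj r) e = pvProj (pvStepB r e) := by
  by_cases hcol : ':' ∈ e.toList
  · -- the element tokenizes as [k1, v1]
    have hmap := PySem.Str.splitMax?_map e ":" 1
    rw [show (":" : String).toList = [':'] from rfl] at hmap
    rw [PySem.Chars.splitMax?, if_neg (by decide), splitOnMax_colon e.toList hcol] at hmap
    obtain ⟨xs, hxs, hmapeq⟩ : ∃ xs, PySem.Str.splitMax? e ":" 1 = some xs ∧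
        xs.map String.toList =
          [e.toList.takeWhile (· ≠ ':'), (e.toList.dropWhile (· ≠ ':')).tail] := by
      cases h : PySem.Str.splitMax? e ":" 1 with
      | none => rw [h] at hmap; simp at hmap
      | some xs => rw [h] at hmap; exact ⟨xs, rfl, by simpa using hmap⟩
    obtain ⟨k1, v1, rfl⟩ : ∃ k1 v1, xs = [k1, v1] := by
      cases xs with
      | nil => simp at hmapeq
      | cons a t =>
        cases t with
        | nil => simp at hmapeq
        | cons b t2 =>
          cases t2 with
          | nil => exact ⟨a, b, rfl⟩
          | cons c t3 => simp at hmapeq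
    simp only [List.map_cons, List.map_nil, List.cons.injEq, and_true] at hmapeq
    obtain ⟨hk1, hv1⟩ := hmapeq
    have hnc : ':' ∉ k1.toList := by
      rw [hk1]; intro hmem
      simpa using List.mem_takeWhile_imp hmem
    have hdw := dropWhile_colon e.toList hcol
    have hcs : e.toList = k1.toList ++ ':' :: v1.toList := by
      rw [hk1, hv1]
      conv_lhs => rw [← List.takeWhile_append_dropWhile (p := (· ≠ ':')) (l := e.toList)]
      exact congrArg (fun l => e.toList.takeWhile (· ≠ ':') ++ l) hdw
    have hB : pvStepB r e = r.insert k1 v1 := by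
      unfold pvStepB
      rw [if_pos ((isIn_colon e).mpr hcol), hxs]
      rfl
    have hswS := key_startswith e.toList k1.toList v1.toList 'S' (by decide) hcs hnc
    have hswT := key_startswith e.toList k1.toList v1.toList 'T' (by decide) hcs hnc
    have hswP := key_startswith e.toList k1.toList v1.toList 'P' (by decide) hcs hnc
    have hslice : ∀ c : Char, k1.toList = [c] → PySem.Str.slice e (some 2) none = v1 := by
      intro c hkc
      rw [← String.toList_inj, PySem.Str.toList_slice, PySem.Chars.slice_eq_listSlice,
          PySem.List.slice_from _ (by omega : (0:Int) ≤ 2), hcs, hkc]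
      rfl
    have hkey_eq : ∀ (c : Char) (s : String), s.toList = [c] → (k1.toList = [c] ↔ k1 = s) :=
      fun c s hs => by rw [← hs, String.toList_inj]
    have htrue : ∀ (p : String) (c : Char), p.toList = [c, ':'] → c ≠ ':' → k1.toList = [c] →
        PySem.Str.startswith e p = true := by
      intro p c hp hc hkc
      rw [PySem.Str.startswith_eq, PySem.Chars.startswith_iff, hp]
      exact (key_startswith e.toList k1.toList v1.toList c hc hcs hnc).mpr hkc
    have hfalse : ∀ (p : String) (c : Char) (s : String), p.toList = [c, ':'] → c ≠ ':' →
        s.toList = [c] → k1 ≠ s → PySem.Str.startswith e p = false := by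
      intro p c s hp hc hs hne
      rw [PySem.Str.startswith_eq, ← Bool.not_eq_true, PySem.Chars.startswith_iff, hp]
      intro h
      exact hne ((hkey_eq c s hs).mp
        ((key_startswith e.toList k1.toList v1.toList c hc hcs hnc).mp h))
    by_cases hS : k1 = "S"
    · unfold pvStepA
      rw [if_pos (htrue "S:" 'S' rfl (by decide) ((hkey_eq 'S' "S" rfl).mpr hS)),
          hslice 'S' ((hkey_eq 'S' "S" rfl).mpr hS), hB, hS,
          proj_insert_in r "S" v1 hr (by decide),
          show pvNames.getD "S" "" = "ssid" from by decide]
    · by_cases hT : k1 = "T"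
      · unfold pvStepA
        rw [if_neg (by rw [hfalse "S:" 'S' "S" rfl (by decide) rfl hS]; simp),
            if_pos (htrue "T:" 'T' rfl (by decide) ((hkey_eq 'T' "T" rfl).mpr hT)),
            hslice 'T' ((hkey_eq 'T' "T" rfl).mpr hT), hB, hT,
            proj_insert_in r "T" v1 hr (by decide),
            show pvNames.getD "T" "" = "type" from by decide]
      · by_cases hP : k1 = "P"
        · unfold pvStepA
          rw [if_neg (by rw [hfalse "S:" 'S' "S" rfl (by decide) rfl hS]; simp),
              if_neg (by rw [hfalse "T:" 'T' "T" rfl (by decide) rfl hT]; simp),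
              if_pos (htrue "P:" 'P' rfl (by decide) ((hkey_eq 'P' "P" rfl).mpr hP)),
              hslice 'P' ((hkey_eq 'P' "P" rfl).mpr hP), hB, hP,
              proj_insert_in r "P" v1 hr (by decide),
              show pvNames.getD "P" "" = "password" from by decide]
        · unfold pvStepA
          rw [if_neg (by rw [hfalse "S:" 'S' "S" rfl (by decide) rfl hS]; simp),
              if_neg (by rw [hfalse "T:" 'T' "T" rfl (by decide) rfl hT]; simp),
              if_neg (by rw [hfalse "P:" 'P' "P" rfl (by decide) rfl hP]; simp),
              hB, proj_insert_out r k1 v1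
                (by rw [contains_pvNames]; simp [hS, hT, hP])]
  · -- no colon: both steps leave their dict unchanged
    have hB : pvStepB r e = r := by
      unfold pvStepB
      rw [if_neg (by rw [isIn_colon]; exact hcol)]
    have hnsw : ∀ (p : String) (c : Char), p.toList = [c, ':'] →
        PySem.Str.startswith e p = false := by
      intro p c hp
      rw [PySem.Str.startswith_eq, ← Bool.not_eq_true, PySem.Chars.startswith_iff, hp]
      rintro ⟨t, ht⟩
      exact hcol (by rw [← ht]; simp)
    unfold pvStepA
    rw [if_neg (by rw [hnsw "S:" 'S' rfl]; simp),
        if_neg (by rw [hnsw "T:" 'T' rfl]; simp),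
        if_neg (by rw [hnsw "P:" 'P' rfl]; simp), hB]

theorem fold_comm (es : List String) (r : PySem.Dict String String) (hr : r.keys.Nodup) :
    es.foldl pvStepA (pvProj r) = pvProj (es.foldl pvStepB r) := by
  induction es generalizing r with
  | nil => rfl
  | cons e es ih =>
      simp only [List.foldl_cons, step_comm r hr e]
      apply ih
      unfold pvStepB
      split
      · split
        · exact PySem.Dict.nodup_keys_insert _ _ _ hr
        · exact hr
      · exact hr

-- ===== VERDICT (by name: the statement is the Claim_ definition above) =====
theorem parse_wifi_info_spec : Claim_equal_parse_wifi_info := by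
  intro qr _
  unfold Spec_parse_wifi_info parse_wifi_info parse_wifi_info_alt
  have h := fold_comm ((PySem.Str.split? (PySem.Str.slice qr (some 5) none) ";").getD [])
      PySem.Dict.empty PySem.Dict.nodup_keys_empty
  simpa [pvProj] using congrArg PySem.Dict.items h
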